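-- pv_equiv track=rewrite | github.com/AronIS98/Basic | Aron_verkefni/scrambled_words.py | scramble_middle
-- ===== SOURCE A (Python) =====
-- import string
--
-- def scramble_middle(texti):
--     """A function that "scrambles" words by swapping adjacent characters from left to right,
--         but leaves the first and last character untouched"""
--     shuffled_str = ""
--     punct = ""
--     final_char = ""
--     place = 0
--
--     if texti[-1] in string.punctuation:
--         punct = texti[-1]
--         str_cleaned = texti[0:-1]
--     else:
--         str_cleaned = texti
--
--     first_char = str_cleaned[0]
--     middle = str_cleaned[1:-1]
--     reps = len(middle)//2
--
--     if len(str_cleaned)>1: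
--         if len(str_cleaned) % 2 == 0:
--             final_char = str_cleaned[-1]
--         else:
--             final_char=str_cleaned[-2::]
--     #A loop in which the scrambling it self occurs:
--     while reps>0:
--         letter_1 = middle[(0 + place)]
--         letter_2 = middle[(1 + place)]
--         shuffled_str += (letter_2 + letter_1)
--         reps -= 1
--         place += 2
--     return (first_char + shuffled_str + final_char + punct)
-- ===== SOURCE B (Python) =====
-- import string
--
-- def scramble_middle(texti):
--     punct = texti[-1] if texti[-1] in string.punctuation else ""
--     s = texti[:-1] if punct else texti
--     first, tail = s[0], s[1:]
--     out = []
--     held = ""   # at most one character waiting for its swap partner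
--     for i, c in enumerate(tail):
--         if i == len(tail) - 1:   # the last character of s stays in place
--             out.append(held + c)
--         elif held:
--             out.append(c + held)
--             held = ""
--         else:
--             held = c
--     return first + "".join(out) + punct
-- ===== Notes on version B (the rewrite author's own statement) =====
-- stated objective: faster
-- what changed: Replaces A's staged pipeline (extract middle slice, count reps, step place by 2 in a while loop accumulating with str +=, separate final_char bookkeeping with an s[-2:] slice) by one enumerate pass over the tail with a one-character buffer, collecting pieces in a list joined once at the end.
import Mathlib
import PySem

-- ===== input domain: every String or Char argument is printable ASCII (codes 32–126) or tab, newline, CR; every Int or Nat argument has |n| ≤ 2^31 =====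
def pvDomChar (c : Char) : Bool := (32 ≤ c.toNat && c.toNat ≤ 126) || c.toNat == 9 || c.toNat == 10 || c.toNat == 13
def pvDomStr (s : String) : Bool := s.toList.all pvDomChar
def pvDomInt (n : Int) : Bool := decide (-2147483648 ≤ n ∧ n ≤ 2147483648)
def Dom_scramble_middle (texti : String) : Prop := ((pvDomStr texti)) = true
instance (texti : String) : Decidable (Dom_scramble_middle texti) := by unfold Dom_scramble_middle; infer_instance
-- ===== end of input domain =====

-- B replaces A's reps/place while loop over an extracted middle slice (plus separate final_char
-- bookkeeping) by a single enumerate pass over the tail with a one-character buffer, joined once (objective: faster).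

-- string.punctuation, as a literal character list
def pvPunct : List Char :=
  ['!', '"', '#', '$', '%', '&', '\'', '(', ')', '*', '+', ',', '-', '.', '/',
   ':', ';', '<', '=', '>', '?', '@', '[', '\\', ']', '^', '_', '`', '{', '|', '}', '~']

-- ===== PORT A =====
-- the while loop: reps counts down, place steps by 2, shuffled_str accumulates letter_2+letter_1
def scrambleLoopA (middle : List Char) : Nat → Nat → List Char → List Char
  | 0, _, acc => acc
  | r + 1, place, acc =>
    match PySem.List.pyGet? middle (place : Int), PySem.List.pyGet? middle ((place : Int) + 1) with
    | some l1, some l2 => scrambleLoopA middle r (place + 2) (acc ++ [l2, l1])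
    | _, _ => acc   -- unreachable for reps = len(middle)//2 (Python would raise IndexError)

def scramble_middle (texti : String) : String :=
  let t := texti.toList
  let cp : List Char × List Char :=
    match PySem.List.pyGet? t (-1) with
    | some c =>
        if c ∈ pvPunct then (PySem.List.slice t (some 0) (some (-1)), [c]) else (t, [])
    | none => ([], [])        -- texti[-1] raises IndexError on "" (excluded by Pre_)
  let s := cp.1
  match PySem.List.pyGet? s 0 with
  | none => ""                -- str_cleaned[0] raises IndexError (excluded by Pre_)
  | some first_char =>
    let middle := PySem.List.slice s (some 1) (some (-1))
    let reps := middle.length / 2      -- len(middle)//2 (nonnegative)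
    let final_char : List Char :=
      if 1 < s.length then
        if s.length % 2 = 0 then
          match PySem.List.pyGet? s (-1) with | some c => [c] | none => []
        else PySem.List.slice s (some (-2)) none
      else []
    String.ofList (first_char :: scrambleLoopA middle reps 0 [] ++ final_char ++ cp.2)

-- ===== PORT B =====
-- the loop body: (out, held) updated per (i, c); at i = len-1 emit held+c, else buffer/flush
def loopB (n : Int) (st : List Char × List Char) (p : Int × Char) : List Char × List Char :=
  if p.1 = n - 1 then (st.1 ++ st.2 ++ [p.2], st.2)
  else if st.2 ≠ [] then (st.1 ++ [p.2] ++ st.2, [])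
  else (st.1, [p.2])

def scramble_middle_alt (texti : String) : String :=
  let t := texti.toList
  let sp : List Char × List Char :=
    match PySem.List.pyGet? t (-1) with
    | some c => if c ∈ pvPunct then (PySem.List.slice t none (some (-1)), [c]) else (t, [])
    | none => ([], [])        -- texti[-1] raises IndexError on "" (excluded by Pre_)
  let s := sp.1
  match PySem.List.pyGet? s 0 with
  | none => ""                -- s[0] raises IndexError (excluded by Pre_)
  | some first =>
    let tail := PySem.List.slice s (some 1) none
    let r := (PySem.List.enumerate tail 0).foldl (loopB (tail.length : Int)) ([], [])
    String.ofList (first :: r.1 ++ sp.2)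

-- ===== PRECONDITION & SPEC =====
-- Pre_ excludes exactly the inputs where Python A raises IndexError: the empty string
-- and a single punctuation character (str_cleaned is empty there).
def Pre_scramble_middle (texti : String) : Prop :=
  2 ≤ texti.toList.length ∨ (texti.toList.length = 1 ∧ texti.toList.headD 'a' ∉ pvPunct)
instance (texti : String) : Decidable (Pre_scramble_middle texti) := by
  unfold Pre_scramble_middle; infer_instance

def pvWitness_scramble_middle : String := "word!"

def Spec_scramble_middle (texti : String) (out : String) : Prop := out = scramble_middle_alt texti
instance (texti : String) (out : String) : Decidable (Spec_scramble_middle texti out) := by unfold Spec_scramble_middle; infer_instance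

-- ===== CLAIM (what is proved, stated in full; the proofs are below) =====
def Claim_equal_scramble_middle : Prop := ∀ (texti : String), Dom_scramble_middle texti → Pre_scramble_middle texti → Spec_scramble_middle texti (scramble_middle texti)

-- ===== LEMMAS AND PROOFS =====

-- A's loop, done over pre ++ m with place = pre.length, swaps the pairs of m and drops a leftover
def swapDropA : List Char → List Char
  | a :: b :: t => b :: a :: swapDropA t
  | _ => []

theorem loopA_eq (m : List Char) : ∀ (pre acc : List Char),
    scrambleLoopA (pre ++ m) (m.length / 2) pre.length acc = acc ++ swapDropA m := by
  induction m using swapDropA.induct with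
  | case1 a b t ih =>
    intro pre acc
    have hlen : (a :: b :: t).length / 2 = t.length / 2 + 1 := by
      simp [List.length_cons]; omega
    rw [hlen]
    have h1 : PySem.List.pyGet? (pre ++ a :: b :: t) (pre.length : Int) = some a :=
      PySem.List.pyGet?_append_length pre (b :: t) a
    have h2 : PySem.List.pyGet? (pre ++ a :: b :: t) ((pre.length : Int) + 1) = some b := by
      have := PySem.List.pyGet?_append_right (pre := pre) (ys := a :: b :: t) (k := 1)
      simpa using this
    rw [scrambleLoopA, h1, h2]
    show scrambleLoopA (pre ++ a :: b :: t) (t.length / 2) (pre.length + 2) (acc ++ [b, a]) =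
      acc ++ swapDropA (a :: b :: t)
    have hre : pre ++ a :: b :: t = (pre ++ [a, b]) ++ t := by simp
    have hpl : pre.length + 2 = (pre ++ [a, b]).length := by simp
    rw [hre, hpl, ih (pre ++ [a, b]) (acc ++ [b, a])]
    simp [swapDropA]
  | case2 t h =>
    intro pre acc
    rcases t with _ | ⟨a, _ | ⟨b, t⟩⟩
    · simp [scrambleLoopA, swapDropA]
    · simp [scrambleLoopA, swapDropA]
    · exact absurd rfl (h a b t)

-- the single pass over mid ++ [z] starting at index k: A's pair swap, the odd leftover, then z;
-- the buffer ends holding exactly the leftover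
theorem loopB_inv (z : Char) : ∀ (mid : List Char) (k : Int) (out : List Char),
    (PySem.List.enumerate (mid ++ [z]) k).foldl (loopB (k + mid.length + 1)) (out, []) =
      (out ++ swapDropA mid ++ (if mid.length % 2 = 1 then mid.getLast?.toList else []) ++ [z],
       if mid.length % 2 = 1 then mid.getLast?.toList else []) := by
  intro mid
  induction mid using swapDropA.induct with
  | case1 a b t ih =>
    intro k out
    simp only [List.cons_append, PySem.List.enumerate_cons, List.foldl_cons]
    have hstep1 : loopB (k + ↑(a :: b :: t).length + 1) (out, []) (k, a) = (out, [a]) := by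
      unfold loopB; simp; omega
    have hstep2 : loopB (k + ↑(a :: b :: t).length + 1) (out, [a]) (k + 1, b) =
        (out ++ [b] ++ [a], []) := by
      unfold loopB; simp; omega
    rw [hstep1, hstep2]
    have hn : k + ((a :: b :: t).length : Int) + 1 = (k + 1 + 1) + (t.length : Int) + 1 := by
      simp; omega
    rw [hn, ih (k + 1 + 1) (out ++ [b] ++ [a])]
    rcases t with _ | ⟨x, t⟩
    · simp [swapDropA]
    · have hpar : (a :: b :: x :: t).length % 2 = (x :: t).length % 2 := by simp; omega
      have hlast : (a :: b :: x :: t).getLast? = (x :: t).getLast? := by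
        simp [List.getLast?_cons_cons]
      simp only [swapDropA, hpar, hlast]
      simp
  | case2 t h =>
    rcases t with _ | ⟨a, _ | ⟨b, t⟩⟩
    · intro k out
      simp only [List.nil_append, PySem.List.enumerate_cons, PySem.List.enumerate_nil,
        List.foldl_cons, List.foldl_nil]
      unfold loopB
      simp [swapDropA]
    · intro k out
      simp only [List.cons_append, List.nil_append, PySem.List.enumerate_cons,
        PySem.List.enumerate_nil, List.foldl_cons, List.foldl_nil]
      have hstep1 : loopB (k + ([a] : List Char).length + 1) (out, []) (k, a) = (out, [a]) := by
        unfold loopB; simp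
      have hstep2 : loopB (k + ([a] : List Char).length + 1) (out, [a]) (k + 1, z) =
          (out ++ [a] ++ [z], [a]) := by
        unfold loopB; simp
      rw [hstep1, hstep2]
      simp [swapDropA]
    · exact absurd rfl (h a b t)

-- xs[1:-1] is tail-then-dropLast
theorem slice_one_neg_one (xs : List Char) :
    PySem.List.slice xs (some 1) (some (-1)) = xs.tail.dropLast := by
  simp [PySem.List.slice, PySem.List.clampIdx]
  rcases xs with _ | ⟨x, t⟩
  · simp
  · simp [List.dropLast_eq_take]

-- A's body equals B's body on any nonempty cleaned string s, for any punct suffix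
theorem body_eq (s punct : List Char) (hs : s ≠ []) :
    (match PySem.List.pyGet? s 0 with
     | none => ""
     | some first_char =>
       String.ofList (first_char :: scrambleLoopA (PySem.List.slice s (some 1) (some (-1)))
          ((PySem.List.slice s (some 1) (some (-1))).length / 2) 0 [] ++
          (if 1 < s.length then
            if s.length % 2 = 0 then
              (match PySem.List.pyGet? s (-1) with | some c => [c] | none => [])
            else PySem.List.slice s (some (-2)) none
           else []) ++ punct))
    = (match PySem.List.pyGet? s 0 with
       | none => ""
       | some first =>
         let tail := PySem.List.slice s (some 1) none
         String.ofList (first ::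
           ((PySem.List.enumerate tail 0).foldl (loopB (tail.length : Int)) ([], [])).1
           ++ punct)) := by
  rcases s with _ | ⟨first, rest⟩
  · exact absurd rfl hs
  rcases List.eq_nil_or_concat rest with rfl | ⟨mid, z, rfl⟩
  · rw [slice_one_neg_one]
    simp [scrambleLoopA, PySem.List.slice_from_one, PySem.List.enumerate_nil]
  · simp only [List.concat_eq_append] at hs ⊢
    have h0 : PySem.List.pyGet? (first :: (mid ++ [z])) 0 = some first := by simp
    have hloop := loopA_eq mid [] []
    simp only [List.nil_append, List.length_nil] at hloop
    rw [slice_one_neg_one]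
    have hlast : PySem.List.pyGet? (first :: (mid ++ [z])) (-1) = some z := by
      rw [PySem.List.pyGet?_neg_one]; exact List.getLast?_concat (l := first :: mid)
    have hfold := loopB_inv z mid 0 []
    simp only [List.nil_append, zero_add] at hfold
    have hlen : ((mid ++ [z]).length : Int) = (mid.length : Int) + 1 := by simp
    simp only [h0, List.tail_cons, List.dropLast_concat, hloop, hlast,
      PySem.List.slice_from_one, hlen, hfold]
    -- A's final_char equals B's leftover ++ [z]
    have hglue : (if (first :: (mid ++ [z])).length % 2 = 0 then [z]
        else PySem.List.slice (first :: (mid ++ [z])) (some (-2)) none)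
        = (if mid.length % 2 = 1 then mid.getLast?.toList else []) ++ [z] := by
      by_cases hp : mid.length % 2 = 0
      · rw [if_pos (by simp; omega), if_neg (by omega)]
        simp
      · rw [if_neg (by simp; omega), if_pos (by omega),
            PySem.List.slice_from_neg_ofNat _ 2 (by norm_num)]
        rcases List.eq_nil_or_concat mid with rfl | ⟨mid', w, rfl⟩
        · simp at hp
        · simp only [List.concat_eq_append]
          have hL : (first :: ((mid' ++ [w]) ++ [z])).length - 2 = mid'.length + 1 := by
            simp
          rw [hL, List.drop_succ_cons, List.append_assoc, List.drop_left]
          simp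
    simp only [if_pos (show 1 < (first :: (mid ++ [z])).length from by simp)] at *
    rw [hglue]
    simp

-- ===== VERDICT (by name: the statement is the Claim_ definition above) =====
theorem scramble_middle_spec : Claim_equal_scramble_middle := by
  unfold Claim_equal_scramble_middle
  intro texti _ hpre
  unfold Spec_scramble_middle scramble_middle scramble_middle_alt
  cases h : PySem.List.pyGet? texti.toList (-1) with
  | none =>
    exfalso
    rw [PySem.List.pyGet?_neg_one, List.getLast?_eq_none_iff] at h
    unfold Pre_scramble_middle at hpre
    rcases hpre with h2 | ⟨h1, _⟩
    · rw [h] at h2; simp at h2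
    · rw [h] at h1; simp at h1
  | some c =>
    simp only [h]
    by_cases hc : c ∈ pvPunct
    · have hlen2 : 2 ≤ texti.toList.length := by
        unfold Pre_scramble_middle at hpre
        rcases hpre with h2 | ⟨h1, hh⟩
        · exact h2
        · exfalso
          obtain ⟨x, hx⟩ : ∃ x, texti.toList = [x] := List.length_eq_one_iff.mp h1
          rw [PySem.List.pyGet?_neg_one, hx] at h
          simp at h
          rw [hx] at hh
          simp at hh
          exact hh (h ▸ hc)
      have hne : texti.toList.dropLast ≠ [] := by
        intro hnil
        have hlen : texti.toList.length - 1 = 0 := by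
          rw [← List.length_dropLast, hnil]; rfl
        omega
      simp only [hc, if_pos, PySem.List.slice_zero_start, PySem.List.slice_to_neg_one]
      exact body_eq texti.toList.dropLast [c] hne
    · have hne : texti.toList ≠ [] := by
        intro hnil; rw [PySem.List.pyGet?_neg_one, hnil] at h; simp at h
      simp only [hc, if_false]
      exact body_eq texti.toList [] hne
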